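-- pv_equiv track=rewrite | github.com/nuclear-treestump/pydepgate | src/pydepgate/enrichers/_magic.py | is_base64
-- ===== SOURCE A (Python) =====
-- _BASE64_ALPHABET = frozenset(
--     "ABCDEFGHIJKLMNOPQRSTUVWXYZ"
--     "abcdefghijklmnopqrstuvwxyz"
--     "0123456789+/=-_"
-- )
--
-- _HEX_ALPHABET = frozenset("0123456789abcdefABCDEF")
--
-- _MIN_BASE64_CHARS = 16   # 16 b64 chars -> 12 bytes
--
-- def is_base64(s: str) -> bool:
--     """True if s looks like a base64-encoded payload.
--
--     Criteria: minimum length, alphabet-only (after whitespace strip),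
--     and presence of mixed case (excludes pure-hex strings that also
--     happen to be base64-alphabet-valid).
--     """
--     stripped = "".join(s.split())
--     if len(stripped) < _MIN_BASE64_CHARS:
--         return False
--     if not all(c in _BASE64_ALPHABET for c in stripped):
--         return False
--     # Discriminator: hex strings would also match, so require some
--     # base64-only character (lowercase letter, '+', '/', '-', '_')
--     # to avoid claiming pure-hex content as base64.
--     has_b64_specific = any(
--         c in stripped
--         for c in "abcdefghijklmnopqrstuvwxyz+/-_="
--         if c not in _HEX_ALPHABET
--     )
--     if not has_b64_specific:
--         # Could be hex; let is_pure_hex claim it.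
--         return False
--     return True
-- ===== SOURCE B (Python) =====
-- _B64_ALPHABET = frozenset(
--     "ABCDEFGHIJKLMNOPQRSTUVWXYZ"
--     "abcdefghijklmnopqrstuvwxyz"
--     "0123456789+/=-_"
-- )
--
-- # base64-specific characters: alphabet members that are not hex digits
-- # (lowercase g-z, '+', '/', '-', '_', '=')
-- _B64_SPECIFIC = frozenset("ghijklmnopqrstuvwxyz+/-_=")
--
-- _MIN_BASE64_CHARS = 16
--
--
-- def is_base64(s: str) -> bool:
--     stripped = "".join(s.split())
--     if len(stripped) < _MIN_BASE64_CHARS: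
--         return False
--     has_specific = False
--     for c in stripped:
--         if c not in _B64_ALPHABET:
--             return False
--         if c in _B64_SPECIFIC:
--             has_specific = True
--     return has_specific
-- ===== Notes on version B (the rewrite author's own statement) =====
-- stated objective: simpler
-- what changed: Replaces A's two separate scans (an all(...) over the string, then an any(...) generator over the specific alphabet doing a substring-membership scan per character) with a single pass over the stripped string that validates the alphabet and records a flag via one precomputed set of the non-hex alphabet characters.
import Mathlib
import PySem

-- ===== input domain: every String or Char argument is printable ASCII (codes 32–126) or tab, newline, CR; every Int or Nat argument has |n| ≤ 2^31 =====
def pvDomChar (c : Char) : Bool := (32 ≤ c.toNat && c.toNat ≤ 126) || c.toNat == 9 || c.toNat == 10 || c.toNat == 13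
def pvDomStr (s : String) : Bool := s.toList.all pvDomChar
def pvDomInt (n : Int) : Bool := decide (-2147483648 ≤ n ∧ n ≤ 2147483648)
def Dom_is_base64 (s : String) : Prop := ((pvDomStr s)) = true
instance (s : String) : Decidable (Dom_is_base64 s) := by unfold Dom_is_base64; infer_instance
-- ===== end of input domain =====

-- B replaces A's two separate scans with one pass over the stripped string (simpler decomposition).


-- ===== PORT A =====
def b64AlphabetA : PySem.Set Char :=
  PySem.Set.ofList ("ABCDEFGHIJKLMNOPQRSTUVWXYZabcdefghijklmnopqrstuvwxyz0123456789+/=-_".toList)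

def hexAlphabetA : PySem.Set Char := PySem.Set.ofList ("0123456789abcdefABCDEF".toList)

def is_base64 (s : String) : Bool :=
  let stripped := PySem.Chars.join [] (PySem.Chars.split₀ s.toList)
  if stripped.length < 16 then false
  else if !(stripped.all (fun c => PySem.Set.contains b64AlphabetA c)) then false
  else
    -- any(c in stripped for c in "abcdefghijklmnopqrstuvwxyz+/-_=" if c not in _HEX_ALPHABET)
    let hasB64Specific :=
      (("abcdefghijklmnopqrstuvwxyz+/-_=".toList.filter
          (fun c => !(PySem.Set.contains hexAlphabetA c))).any
        (fun c => stripped.contains c))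
    if !hasB64Specific then false
    else true

-- ===== PORT B =====
def b64AlphabetB : PySem.Set Char :=
  PySem.Set.ofList ("ABCDEFGHIJKLMNOPQRSTUVWXYZabcdefghijklmnopqrstuvwxyz0123456789+/=-_".toList)

def b64SpecificB : PySem.Set Char := PySem.Set.ofList ("ghijklmnopqrstuvwxyz+/-_=".toList)

def b64ScanB : List Char → Bool → Bool
  | [], hasSpecific => hasSpecific
  | c :: rest, hasSpecific =>
    if !(PySem.Set.contains b64AlphabetB c) then false
    else b64ScanB rest (hasSpecific || PySem.Set.contains b64SpecificB c)

def is_base64_alt (s : String) : Bool :=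
  let stripped := PySem.Chars.join [] (PySem.Chars.split₀ s.toList)
  if stripped.length < 16 then false
  else b64ScanB stripped false

-- ===== PRECONDITION & SPEC =====
def Spec_is_base64 (s : String) (out : Bool) : Prop := out = is_base64_alt s
instance (s : String) (out : Bool) : Decidable (Spec_is_base64 s out) := by unfold Spec_is_base64; infer_instance

-- ===== CLAIM (what is proved, stated in full; the proofs are below) =====
def Claim_equal_is_base64 : Prop := ∀ (s : String), Dom_is_base64 s → Spec_is_base64 s (is_base64 s)

-- ===== LEMMAS AND PROOFS =====

-- B's loop computes: alphabet-valid AND (flag already set OR some specific char present)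
theorem b64ScanB_eq (l : List Char) (acc : Bool) :
    b64ScanB l acc =
      (l.all (fun c => PySem.Set.contains b64AlphabetB c) &&
        (acc || l.any (fun c => PySem.Set.contains b64SpecificB c))) := by
  induction l generalizing acc with
  | nil => simp [b64ScanB]
  | cons c rest ih =>
    rw [b64ScanB, ih, List.all_cons, List.any_cons]
    cases h : PySem.Set.contains b64AlphabetB c <;>
      cases acc <;> cases PySem.Set.contains b64SpecificB c <;> simp

-- existence of a common element is symmetric in the two lists
theorem any_mem_comm (xs ys : List Char) :
    xs.any (fun c => ys.contains c) = ys.any (fun c => xs.contains c) := by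
  rw [Bool.eq_iff_iff]
  simp only [List.any_eq_true, List.contains_iff_mem]
  exact ⟨fun ⟨c, h1, h2⟩ => ⟨c, h2, h1⟩, fun ⟨c, h1, h2⟩ => ⟨c, h2, h1⟩⟩

-- A's scan over the filtered specific alphabet = B's scan over the string
theorem any_swap (l : List Char) :
    (("abcdefghijklmnopqrstuvwxyz+/-_=".toList.filter
        (fun c => !(PySem.Set.contains hexAlphabetA c))).any
      (fun c => l.contains c)) =
      l.any (fun c => PySem.Set.contains b64SpecificB c) := by
  have hfilter : "abcdefghijklmnopqrstuvwxyz+/-_=".toList.filter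
      (fun c => !(PySem.Set.contains hexAlphabetA c)) = b64SpecificB := by decide
  rw [hfilter]
  exact any_mem_comm b64SpecificB l

-- ===== VERDICT (by name: the statement is the Claim_ definition above) =====
theorem is_base64_spec : Claim_equal_is_base64 := by
  intro s _
  unfold Spec_is_base64 is_base64 is_base64_alt
  set stripped := PySem.Chars.join [] (PySem.Chars.split₀ s.toList) with hs
  by_cases hlen : stripped.length < 16
  · simp [hlen]
  · simp only [if_neg hlen]
    rw [b64ScanB_eq, any_swap, show b64AlphabetB = b64AlphabetA from rfl,
      Bool.false_or]
    cases stripped.all (fun c => PySem.Set.contains b64AlphabetA c) <;>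
      cases stripped.any (fun c => PySem.Set.contains b64SpecificB c) <;> simp
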